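-- pv_equiv track=rewrite | github.com/SocratesMindset/pythonWithMipt | Task1-2/lists.py | listsTaskSix
-- ===== SOURCE A (Python) =====
-- def listsTaskSix(data, kernel):
--     n = len(data)
--     m = len(kernel)
--     if m == 0:
--         raise ValueError("Ядро пустое")
--     if n < m:
--         return []
--     out_len = n - m + 1
--     out = [0] * out_len
--     i = 0
--     while i < out_len:
--         j = 0
--         s = 0
--         while j < m:
--             s = s + data[i + j] * kernel[j]
--             j = j + 1
--         out[i] = s
--         i = i + 1
--     return out
-- ===== SOURCE B (Python) =====
-- def listsTaskSix(data, kernel):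
--     if not kernel:
--         raise ValueError("Ядро пустое")
--     m = len(kernel)
--     out = []
--     tail = data
--     while len(tail) >= m:
--         out.append(sum(x * k for x, k in zip(tail, kernel)))
--         tail = tail[1:]
--     return out
-- ===== Notes on version B (the rewrite author's own statement) =====
-- stated objective: alternative
-- what changed: B traverses suffixes of data instead of index arithmetic: it walks tail = data, data[1:], ... while len(tail) >= m, appending the zip-dot-product of each suffix with the kernel, with no preallocated output array and no index variables.
import Mathlib
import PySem

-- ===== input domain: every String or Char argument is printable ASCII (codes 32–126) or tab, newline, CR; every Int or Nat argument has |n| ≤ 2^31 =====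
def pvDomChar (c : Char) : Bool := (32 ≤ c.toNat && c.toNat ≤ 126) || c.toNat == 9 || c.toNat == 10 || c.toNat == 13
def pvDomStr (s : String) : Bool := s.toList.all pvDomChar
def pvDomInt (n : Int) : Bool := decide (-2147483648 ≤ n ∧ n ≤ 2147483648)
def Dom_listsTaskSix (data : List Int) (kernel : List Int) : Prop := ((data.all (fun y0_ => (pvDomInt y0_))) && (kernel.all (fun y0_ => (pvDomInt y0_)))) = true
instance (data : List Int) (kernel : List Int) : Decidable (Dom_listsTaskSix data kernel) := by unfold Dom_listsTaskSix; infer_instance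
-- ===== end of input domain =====

-- B replaces A's index-driven nested while loops by a traversal of the suffixes of data,
-- appending each suffix's zip-dot-product with the kernel; equivalence of the return values is
-- proved on Pre_ (nonempty kernel; on an empty kernel both Pythons raise ValueError).

-- ===== PORT A =====
-- Literal port of A: outer while over output indices, inner while accumulating the dot
-- product s, writing it into the preallocated out list.  All data/kernel indices reached by
-- the loops are in range, so `getD _ 0` is exact for Python's data[i+j] / kernel[j].
def listsTaskSix (data : List Int) (kernel : List Int) : List Int :=
  let n := data.length
  let m := kernel.length
  if m = 0 then []          -- Python: raise ValueError("Ядро пустое"); excluded by Pre_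
  else if n < m then []
  else
    let outLen := n - m + 1
    (List.range outLen).foldl
      (fun out i =>
        out.set i ((List.range m).foldl
          (fun s j => s + data.getD (i + j) 0 * kernel.getD j 0) 0))
      (List.replicate outLen 0)

-- ===== PORT B =====
-- B's while loop `while len(tail) >= m: out.append(sum(x*k for x,k in zip(tail, kernel))); tail = tail[1:]`
-- as structural recursion on tail; zip → zipWith, the generator-sum → List.sum.
-- (The [] => [] arm is only reached with m ≥ 1, where Python's loop condition is false too;
-- m = 0 never reaches the loop since Python raised already.)
def pvCorrGo (m : Nat) (kernel : List Int) : List Int → List Int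
  | [] => []
  | x :: rest =>
      if rest.length + 1 ≥ m then
        (List.zipWith (· * ·) (x :: rest) kernel).sum :: pvCorrGo m kernel rest
      else []

def listsTaskSix_alt (data : List Int) (kernel : List Int) : List Int :=
  if kernel = [] then []    -- Python: raise ValueError("Ядро пустое"); excluded by Pre_
  else pvCorrGo kernel.length kernel data

-- ===== PRECONDITION & SPEC =====
-- Pre_ excludes exactly the inputs where Python A raises: an empty kernel (ValueError); B raises there too.
def Pre_listsTaskSix (data : List Int) (kernel : List Int) : Prop := kernel ≠ []
instance (data : List Int) (kernel : List Int) : Decidable (Pre_listsTaskSix data kernel) := by unfold Pre_listsTaskSix; infer_instance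
def pvWitness_listsTaskSix : List Int × List Int := ([1, 2, 3], [1, -1])

def Spec_listsTaskSix (data : List Int) (kernel : List Int) (out : List Int) : Prop := out = listsTaskSix_alt data kernel
instance (data : List Int) (kernel : List Int) (out : List Int) : Decidable (Spec_listsTaskSix data kernel out) := by unfold Spec_listsTaskSix; infer_instance

-- ===== CLAIM (what is proved, stated in full; the proofs are below) =====
def Claim_equal_listsTaskSix : Prop := ∀ (data : List Int) (kernel : List Int), Dom_listsTaskSix data kernel → Pre_listsTaskSix data kernel → Spec_listsTaskSix data kernel (listsTaskSix data kernel)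

-- ===== LEMMAS AND PROOFS =====

-- Generic in-place update loop: fold over range n setting index i to φ (o[i]) i.
theorem pvFold_set_length (φ : Int → Nat → Int) (n : Nat) (o : List Int) :
    ((List.range n).foldl (fun o i => o.set i (φ (o.getD i 0) i)) o).length = o.length := by
  induction n generalizing o with
  | zero => simp
  | succ n ih =>
      rw [List.range_succ, List.foldl_append]
      simp only [List.foldl_cons, List.foldl_nil, List.length_set]
      exact ih o

theorem pvGetD_set_self (l : List Int) (i : Nat) (v d : Int) (h : i < l.length) :
    (l.set i v).getD i d = v := by
  simp [List.getD, h]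

theorem pvGetD_set_other (l : List Int) (n i : Nat) (v d : Int) (h : n ≠ i) :
    (l.set n v).getD i d = l.getD i d := by
  simp [List.getD, h]

theorem pvFold_set_getD (φ : Int → Nat → Int) (n : Nat) (o : List Int)
    (hn : n ≤ o.length) :
    ∀ (i : Nat) (d : Int), i < o.length →
    ((List.range n).foldl (fun o i => o.set i (φ (o.getD i 0) i)) o).getD i d =
      if i < n then φ (o.getD i 0) i else o.getD i d := by
  induction n with
  | zero => intro i d hi; simp
  | succ n ih =>
      intro i d hi
      rw [List.range_succ, List.foldl_append]
      simp only [List.foldl_cons, List.foldl_nil]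
      have hlen := pvFold_set_length φ n o
      have hn' : n ≤ o.length := Nat.le_of_succ_le hn
      by_cases hin : i = n
      · rw [hin, pvGetD_set_self _ _ _ _ (by rw [hlen]; omega),
          ih hn' n 0 (by omega), if_neg (by omega), if_pos (by omega)]
      · rw [pvGetD_set_other _ _ _ _ _ (fun h => hin h.symm), ih hn' i d hi]
        simp only [show (i < n + 1) ↔ (i < n) by omega]

-- A's inner while-loop sum, shifted: starting tap j0, remaining taps ks.
def pvTsum (data : List Int) : List Int → Nat → Nat → Int
  | [], _, _ => 0
  | k :: ks, j0, i => data.getD (i + j0) 0 * k + pvTsum data ks (j0 + 1) i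

theorem pvSumRange (data : List Int) (ks : List Int) (j0 i : Nat) (c : Int) :
    (List.range ks.length).foldl (fun s j => s + data.getD (i + j0 + j) 0 * ks.getD j 0) c =
      c + pvTsum data ks j0 i := by
  induction ks generalizing j0 c with
  | nil => simp [pvTsum]
  | cons k ks ih =>
      rw [List.length_cons, List.range_succ_eq_map, List.foldl_cons, List.foldl_map]
      have : ∀ (s : Int) (j : Nat),
          s + data.getD (i + j0 + (j + 1)) 0 * (k :: ks).getD (j + 1) 0 =
          s + data.getD (i + (j0 + 1) + j) 0 * ks.getD j 0 := by
        intro s j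
        have : i + j0 + (j + 1) = i + (j0 + 1) + j := by omega
        simp [this]
      simp only [this]
      rw [ih (j0 + 1) _]
      simp [pvTsum]
      ring

-- The zip-dot-product of the suffix starting at i+j0 is A's shifted sum, given the window fits.
theorem pvDot_eq_tsum (data : List Int) (ks : List Int) (j0 i : Nat)
    (h : i + j0 + ks.length ≤ data.length) :
    (List.zipWith (· * ·) (data.drop (i + j0)) ks).sum = pvTsum data ks j0 i := by
  induction ks generalizing j0 with
  | nil => simp [pvTsum]
  | cons k ks ih =>
      have hlt : i + j0 < data.length := by simp at h; omega
      rw [List.drop_eq_getElem_cons hlt, List.zipWith_cons_cons, List.sum_cons, pvTsum]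
      have h1 : i + (j0 + 1) + ks.length ≤ data.length := by simp at h; omega
      have := ih (j0 + 1) h1
      rw [show i + (j0 + 1) = i + j0 + 1 from by omega] at this
      rw [this, List.getD, List.getElem?_eq_getElem hlt]
      simp

-- B's suffix walk, as a map over the output indices.
theorem pvCorrGo_eq_map (kernel : List Int) (hm : 1 ≤ kernel.length) :
    ∀ tail : List Int, pvCorrGo kernel.length kernel tail =
      (List.range (tail.length + 1 - kernel.length)).map
        (fun i => (List.zipWith (· * ·) (tail.drop i) kernel).sum) := by
  intro tail
  induction tail with
  | nil =>
      have : (0:Nat) + 1 - kernel.length = 0 := by omega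
      simp [pvCorrGo, this]
  | cons x rest ih =>
      rw [pvCorrGo]
      by_cases hge : rest.length + 1 ≥ kernel.length
      · rw [if_pos hge, ih]
        have hlen : (x :: rest).length + 1 - kernel.length
            = (rest.length + 1 - kernel.length) + 1 := by simp; omega
        rw [hlen, List.range_succ_eq_map, List.map_cons, List.map_map]
        simp [Function.comp]
      · rw [if_neg hge]
        have h0 : (x :: rest).length + 1 - kernel.length = 0 := by simp; omega
        rw [h0, List.range_zero, List.map_nil]

-- ===== VERDICT (by name: the statement is the Claim_ definition above) =====
theorem listsTaskSix_spec : Claim_equal_listsTaskSix := by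
  intro data kernel _ hpre
  unfold Spec_listsTaskSix listsTaskSix listsTaskSix_alt
  simp only []
  have hm : kernel.length ≠ 0 := by simpa using (List.length_pos_of_ne_nil hpre).ne'
  rw [if_neg hm, if_neg hpre]
  set L := data.length - kernel.length + 1 with hL
  rw [pvCorrGo_eq_map kernel (by omega) data]
  by_cases hnm : data.length < kernel.length
  · rw [if_pos hnm]
    have : data.length + 1 - kernel.length = 0 := by omega
    simp [this]
  rw [if_neg hnm]
  have hLeq : data.length + 1 - kernel.length = L := by omega
  rw [hLeq]
  -- A side: each write is the shifted-sum pvTsum; then compare entrywise with B's map.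
  have hArepl : ∀ i, (List.range kernel.length).foldl
      (fun s j => s + data.getD (i + j) 0 * kernel.getD j 0) 0 = pvTsum data kernel 0 i := by
    intro i
    have := pvSumRange data kernel 0 i 0
    simpa using this
  have hA : (List.range L).foldl
      (fun out i => out.set i ((List.range kernel.length).foldl
        (fun s j => s + data.getD (i + j) 0 * kernel.getD j 0) 0))
      (List.replicate L 0) =
      (List.range L).map (fun i => pvTsum data kernel 0 i) := by
    simp only [hArepl]
    apply List.ext_getElem
    · simpa using pvFold_set_length (fun _ i => pvTsum data kernel 0 i) L (List.replicate L 0)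
    · intro i h1 h2
      have hiL : i < L := by simpa using h2
      have hg := pvFold_set_getD (fun _ i => pvTsum data kernel 0 i) L (List.replicate L 0)
        (by simp) i 0 (by simpa using hiL)
      have hg' : ((List.range L).foldl (fun out i => out.set i (pvTsum data kernel 0 i))
          (List.replicate L 0)).getD i 0 = pvTsum data kernel 0 i := by
        simpa [hiL] using hg
      rw [← List.getD_eq_getElem _ 0 h1, hg']
      simp
  rw [hA]
  apply List.map_congr_left
  intro i hi
  have hiL : i < L := List.mem_range.mp hi
  have hfit : i + 0 + kernel.length ≤ data.length := by omega
  have := pvDot_eq_tsum data kernel 0 i hfit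
  simpa using this.symm
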